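-- pv_equiv track=rewrite | github.com/jeonggyu-jang/pytorch_pkl_to_darknet_weight | pkl_to_csv.py | matching_name_tag
-- ===== SOURCE A (Python) =====
-- bn_layer_name_tags = ['bn','BN','batchnorm','Batchnorm','BatchNorm','batchnormalization','Batchnormalization','BatchNormalization','BATCHNORMALIZATION']
--
-- conv_layer_name_tags = ['conv','Conv','convolution','Convolution','CONV']
--
-- fc_layer_name_tags = ['fc','FC','fullyconnected','Fullyconnected','FullyConnected','FULLYCONNECTED']
--
-- def matching_name_tag(tag):
-- 	for bn_tag in bn_layer_name_tags:
-- 		if bn_tag in tag: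
-- 			if 'weight' in tag:
-- 				return 'bn_weight'
-- 			elif 'bias' in tag:
-- 				return 'bn_bias'
-- 			elif 'running_mean' in tag:
-- 				return 'bn_running_mean'
-- 			elif 'running_var' in tag:
-- 				return 'bn_running_var'
-- 	for conv_tag in conv_layer_name_tags:
-- 		if conv_tag in tag:
-- 			if 'weight' in tag:
-- 				return 'conv_weight'
-- 			elif 'bias' in tag:
-- 				return 'conv_bias'
-- 	for fc_tag in fc_layer_name_tags:
-- 		if fc_tag in tag:
-- 			if 'weight' in tag:
-- 				return 'fc_weight'
-- 			elif 'bias' in tag: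
-- 				return 'fc_bias'
-- ===== SOURCE B (Python) =====
-- bn_layer_name_tags = ['bn','BN','batchnorm','Batchnorm','BatchNorm','batchnormalization','Batchnormalization','BatchNormalization','BATCHNORMALIZATION']
-- conv_layer_name_tags = ['conv','Conv','convolution','Convolution','CONV']
-- fc_layer_name_tags = ['fc','FC','fullyconnected','Fullyconnected','FullyConnected','FULLYCONNECTED']
--
-- # keyword -> flag it raises when found at some position of the tag
-- _KEYWORDS = (
--     [(t, 'bn') for t in bn_layer_name_tags]
--     + [(t, 'conv') for t in conv_layer_name_tags]
--     + [(t, 'fc') for t in fc_layer_name_tags]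
--     + [('weight', 'weight'), ('bias', 'bias'),
--        ('running_mean', 'running_mean'), ('running_var', 'running_var')]
-- )
--
-- _CATS = [('bn', ('weight', 'bias', 'running_mean', 'running_var')),
--          ('conv', ('weight', 'bias')),
--          ('fc', ('weight', 'bias'))]
--
-- def matching_name_tag(tag):
--     # single left-to-right scan: at each position record every keyword starting there
--     found = set()
--     rest = tag
--     while rest:
--         for kw, flag in _KEYWORDS:
--             if rest.startswith(kw):
--                 found.add(flag)
--         rest = rest[1:]
--     # decide from the collected flags alone
--     for cat, suffixes in _CATS:
--         if cat in found:
--             for s in suffixes: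
--                 if s in found:
--                     return cat + '_' + s
--     return None
-- ===== Notes on version B (the rewrite author's own statement) =====
-- stated objective: alternative
-- what changed: Replaces A's three per-category substring-search loops over the tag with a single left-to-right scan of the tag that prefix-matches all keywords at each position into a flag set, followed by a pure decision over the collected flags; substring search over the input happens once instead of per keyword test.
import Mathlib
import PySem

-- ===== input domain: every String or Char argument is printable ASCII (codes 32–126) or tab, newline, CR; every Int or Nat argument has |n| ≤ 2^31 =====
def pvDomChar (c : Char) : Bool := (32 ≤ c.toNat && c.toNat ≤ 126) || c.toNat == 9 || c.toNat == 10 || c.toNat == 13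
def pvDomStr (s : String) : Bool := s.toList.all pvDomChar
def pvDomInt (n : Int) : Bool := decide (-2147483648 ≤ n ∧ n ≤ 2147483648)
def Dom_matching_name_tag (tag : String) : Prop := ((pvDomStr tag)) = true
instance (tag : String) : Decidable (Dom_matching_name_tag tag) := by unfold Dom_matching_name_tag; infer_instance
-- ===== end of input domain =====

-- B replaces A's per-category substring-search loops by a single scan of the tag collecting
-- keyword flags into a set, then a decision over the flags; objective: alternative.

-- ===== PORT A =====
def pvBnTags : List String := ["bn","BN","batchnorm","Batchnorm","BatchNorm","batchnormalization","Batchnormalization","BatchNormalization","BATCHNORMALIZATION"]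
def pvConvTags : List String := ["conv","Conv","convolution","Convolution","CONV"]
def pvFcTags : List String := ["fc","FC","fullyconnected","Fullyconnected","FullyConnected","FULLYCONNECTED"]

-- the 'for bn_tag in bn_layer_name_tags' loop: return value or fall through
def pvLoopBn (tag : String) : List String → Option String
  | [] => none
  | t :: rest =>
    if PySem.Str.isIn t tag then
      if PySem.Str.isIn "weight" tag then some "bn_weight"
      else if PySem.Str.isIn "bias" tag then some "bn_bias"
      else if PySem.Str.isIn "running_mean" tag then some "bn_running_mean"
      else if PySem.Str.isIn "running_var" tag then some "bn_running_var"
      else pvLoopBn tag rest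
    else pvLoopBn tag rest

def pvLoopConv (tag : String) : List String → Option String
  | [] => none
  | t :: rest =>
    if PySem.Str.isIn t tag then
      if PySem.Str.isIn "weight" tag then some "conv_weight"
      else if PySem.Str.isIn "bias" tag then some "conv_bias"
      else pvLoopConv tag rest
    else pvLoopConv tag rest

def pvLoopFc (tag : String) : List String → Option String
  | [] => none
  | t :: rest =>
    if PySem.Str.isIn t tag then
      if PySem.Str.isIn "weight" tag then some "fc_weight"
      else if PySem.Str.isIn "bias" tag then some "fc_bias"
      else pvLoopFc tag rest
    else pvLoopFc tag rest

def matching_name_tag (tag : String) : Option String :=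
  match pvLoopBn tag pvBnTags with
  | some r => some r
  | none =>
    match pvLoopConv tag pvConvTags with
    | some r => some r
    | none =>
      match pvLoopFc tag pvFcTags with
      | some r => some r
      | none => none

-- ===== PORT B =====
-- _KEYWORDS: (keyword as chars, flag it raises)
def pvKeywords : List (List Char × String) :=
  (pvBnTags.map (fun t => (t.toList, "bn")))
  ++ (pvConvTags.map (fun t => (t.toList, "conv")))
  ++ (pvFcTags.map (fun t => (t.toList, "fc")))
  ++ [("weight".toList, "weight"), ("bias".toList, "bias"),
      ("running_mean".toList, "running_mean"), ("running_var".toList, "running_var")]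

-- _CATS
def pvCats : List (String × List String) :=
  [("bn", ["weight", "bias", "running_mean", "running_var"]),
   ("conv", ["weight", "bias"]),
   ("fc", ["weight", "bias"])]

-- one position of the scan: the inner 'for kw, flag in _KEYWORDS' loop on the current suffix
def pvStep (cs : List Char) (found : PySem.Set String) : PySem.Set String :=
  pvKeywords.foldl (fun f kv => if kv.1.isPrefixOf cs then PySem.Set.add f kv.2 else f) found

-- the 'while rest: … rest = rest[1:]' scan over the suffixes of the tag
def pvScan (found : PySem.Set String) : List Char → PySem.Set String
  | [] => found
  | c :: rest => pvScan (pvStep (c :: rest) found) rest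

-- the decision loop over _CATS
def pvDecide (found : PySem.Set String) : List (String × List String) → Option String
  | [] => none
  | (cat, suffixes) :: rest =>
    if PySem.Set.contains found cat then
      match suffixes.find? (fun s => PySem.Set.contains found s) with
      | some s => some (cat ++ "_" ++ s)
      | none => pvDecide found rest
    else pvDecide found rest

def matching_name_tag_alt (tag : String) : Option String :=
  pvDecide (pvScan PySem.Set.empty tag.toList) pvCats

-- ===== PRECONDITION & SPEC =====
def Spec_matching_name_tag (tag : String) (out : Option String) : Prop := out = matching_name_tag_alt tag
instance (tag : String) (out : Option String) : Decidable (Spec_matching_name_tag tag out) := by unfold Spec_matching_name_tag; infer_instance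

-- ===== CLAIM (what is proved, stated in full; the proofs are below) =====
def Claim_equal_matching_name_tag : Prop := ∀ (tag : String), Dom_matching_name_tag tag → Spec_matching_name_tag tag (matching_name_tag tag)

-- ===== LEMMAS AND PROOFS =====

-- each of A's loops returns its if-chain's value when some list tag is a substring, else none
theorem pvLoopBn_eq (tag : String) (l : List String) :
    pvLoopBn tag l =
      if l.any (fun t => PySem.Str.isIn t tag) then
        (if PySem.Str.isIn "weight" tag then some "bn_weight"
         else if PySem.Str.isIn "bias" tag then some "bn_bias"
         else if PySem.Str.isIn "running_mean" tag then some "bn_running_mean"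
         else if PySem.Str.isIn "running_var" tag then some "bn_running_var"
         else none)
      else none := by
  induction l with
  | nil => simp [pvLoopBn]
  | cons t rest ih =>
    rw [pvLoopBn]
    cases h : PySem.Str.isIn t tag
    · simp only [h, if_neg Bool.false_ne_true, ih, List.any_cons, Bool.false_or]
    · rw [ih]; simp only [h, List.any_cons, Bool.true_or]
      split_ifs <;> rfl

theorem pvLoopConv_eq (tag : String) (l : List String) :
    pvLoopConv tag l =
      if l.any (fun t => PySem.Str.isIn t tag) then
        (if PySem.Str.isIn "weight" tag then some "conv_weight"
         else if PySem.Str.isIn "bias" tag then some "conv_bias"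
         else none)
      else none := by
  induction l with
  | nil => simp [pvLoopConv]
  | cons t rest ih =>
    rw [pvLoopConv]
    cases h : PySem.Str.isIn t tag
    · simp only [h, if_neg Bool.false_ne_true, ih, List.any_cons, Bool.false_or]
    · rw [ih]; simp only [h, List.any_cons, Bool.true_or]
      split_ifs <;> rfl

theorem pvLoopFc_eq (tag : String) (l : List String) :
    pvLoopFc tag l =
      if l.any (fun t => PySem.Str.isIn t tag) then
        (if PySem.Str.isIn "weight" tag then some "fc_weight"
         else if PySem.Str.isIn "bias" tag then some "fc_bias"
         else none)
      else none := by
  induction l with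
  | nil => simp [pvLoopFc]
  | cons t rest ih =>
    rw [pvLoopFc]
    cases h : PySem.Str.isIn t tag
    · simp only [h, if_neg Bool.false_ne_true, ih, List.any_cons, Bool.false_or]
    · rw [ih]; simp only [h, List.any_cons, Bool.true_or]
      split_ifs <;> rfl

-- B's inner keyword loop: membership after one step
theorem mem_pvFoldAdd (l : List (List Char × String)) (cs : List Char)
    (found : PySem.Set String) (y : String) :
    y ∈ l.foldl (fun f kv => if kv.1.isPrefixOf cs then PySem.Set.add f kv.2 else f) found ↔
      y ∈ found ∨ ∃ kv ∈ l, kv.1 <+: cs ∧ kv.2 = y := by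
  induction l generalizing found with
  | nil => simp
  | cons kv rest ih =>
    simp only [List.foldl_cons, ih]
    by_cases h : kv.1 <+: cs
    · simp [List.isPrefixOf_iff_prefix.mpr h, PySem.Set.mem_add, eq_comm]; aesop
    · have : kv.1.isPrefixOf cs = false := by
        rw [Bool.eq_false_iff]; intro hc; exact h (List.isPrefixOf_iff_prefix.mp hc)
      simp [this, eq_comm]; aesop

-- B's scan: y is collected iff some keyword with flag y starts at some position of the tag
theorem mem_pvScan (cs : List Char) (found : PySem.Set String) (y : String) :
    y ∈ pvScan found cs ↔
      y ∈ found ∨ ∃ kv ∈ pvKeywords, PySem.Chars.isIn kv.1 cs = true ∧ kv.2 = y := by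
  induction cs generalizing found with
  | nil =>
    simp only [pvScan]
    constructor
    · exact Or.inl
    · rintro (h | ⟨kv, hmem, hin, rfl⟩)
      · exact h
      · -- no keyword (all nonempty) occurs in the empty string
        exfalso
        fin_cases hmem <;> exact absurd hin (by decide)
  | cons c rest ih =>
    rw [pvScan, ih]
    unfold pvStep
    rw [mem_pvFoldAdd]
    constructor
    · rintro ((h | ⟨kv, hm, hp, rfl⟩) | ⟨kv, hm, hin, rfl⟩)
      · exact Or.inl h
      · exact Or.inr ⟨kv, hm, (PySem.Chars.exists_prefix_drop_iff_isIn _ _).mp ⟨0, by simpa using hp⟩, rfl⟩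
      · refine Or.inr ⟨kv, hm, ?_, rfl⟩
        rcases (PySem.Chars.exists_prefix_drop_iff_isIn kv.1 rest).mpr hin with ⟨j, hj⟩
        exact (PySem.Chars.exists_prefix_drop_iff_isIn _ _).mp ⟨j + 1, by simpa using hj⟩
    · rintro (h | ⟨kv, hm, hin, rfl⟩)
      · exact Or.inl (Or.inl h)
      · rcases (PySem.Chars.exists_prefix_drop_iff_isIn kv.1 (c :: rest)).mpr hin with ⟨j, hj⟩
        cases j with
        | zero => exact Or.inl (Or.inr ⟨kv, hm, by simpa using hj, rfl⟩)
        | succ j =>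
          exact Or.inr ⟨kv, hm, (PySem.Chars.exists_prefix_drop_iff_isIn _ _).mp ⟨j, by simpa using hj⟩, rfl⟩

-- the seven flags of the scanned set, as A's substring booleans
theorem contains_scan_bn (tag : String) :
    PySem.Set.contains (pvScan PySem.Set.empty tag.toList) "bn"
      = pvBnTags.any (fun t => PySem.Str.isIn t tag) := by
  rw [Bool.eq_iff_iff, PySem.Set.contains_iff, mem_pvScan]
  simp [pvKeywords, pvBnTags, pvConvTags, pvFcTags, PySem.Set.empty]

theorem contains_scan_conv (tag : String) :
    PySem.Set.contains (pvScan PySem.Set.empty tag.toList) "conv"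
      = pvConvTags.any (fun t => PySem.Str.isIn t tag) := by
  rw [Bool.eq_iff_iff, PySem.Set.contains_iff, mem_pvScan]
  simp [pvKeywords, pvBnTags, pvConvTags, pvFcTags, PySem.Set.empty]

theorem contains_scan_fc (tag : String) :
    PySem.Set.contains (pvScan PySem.Set.empty tag.toList) "fc"
      = pvFcTags.any (fun t => PySem.Str.isIn t tag) := by
  rw [Bool.eq_iff_iff, PySem.Set.contains_iff, mem_pvScan]
  simp [pvKeywords, pvBnTags, pvConvTags, pvFcTags, PySem.Set.empty]

theorem contains_scan_suffix (tag : String) (s : String)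
    (hs : s = "weight" ∨ s = "bias" ∨ s = "running_mean" ∨ s = "running_var") :
    PySem.Set.contains (pvScan PySem.Set.empty tag.toList) s = PySem.Str.isIn s tag := by
  rw [Bool.eq_iff_iff, PySem.Set.contains_iff, mem_pvScan]
  rcases hs with rfl | rfl | rfl | rfl <;>
    simp [pvKeywords, pvBnTags, pvConvTags, pvFcTags, PySem.Set.empty]

-- ===== VERDICT (by name: the statement is the Claim_ definition above) =====
theorem matching_name_tag_spec : Claim_equal_matching_name_tag := by
  intro tag _
  unfold Spec_matching_name_tag matching_name_tag matching_name_tag_alt pvCats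
  rw [pvLoopBn_eq, pvLoopConv_eq, pvLoopFc_eq]
  simp only [pvDecide, List.find?,
    contains_scan_bn, contains_scan_conv, contains_scan_fc,
    contains_scan_suffix tag "weight" (by tauto),
    contains_scan_suffix tag "bias" (by tauto),
    contains_scan_suffix tag "running_mean" (by tauto),
    contains_scan_suffix tag "running_var" (by tauto)]
  split_ifs <;> simp_all
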